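-- pv_equiv track=rewrite | github.com/elektronka/PRI-sprawdzarka | sprawdzarka/upload/RabinKarp.py | get_textlist
-- ===== SOURCE A (Python) =====
-- def get_textlist( list_of_file1, list_of_file2):
--     text_list1 = []
--     text_list2 = []
--     appeared1 = False
--     appeared2 = False
--     for word1 in list_of_file1:
--         if word1 == '</sprawozdanie>':
--             appeared1 = True
--             continue
--         if appeared1 == True and word1 != '':
--             text_list1.append(word1)
--     for word2 in list_of_file2:
--         if word2 == '</sprawozdanie>':
--             appeared2 = True
--             continue
--         if appeared2 == True and word2 != '':
--             text_list2.append(word2)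
--     del(list_of_file1)
--     del(list_of_file2)
--     return text_list1, text_list2
-- ===== SOURCE B (Python) =====
-- MARKER = '</sprawozdanie>'
--
-- def _after_marker(words):
--     """Words strictly after the first marker, dropping '' and further markers."""
--     try:
--         i = words.index(MARKER)
--     except ValueError:
--         return []
--     return [w for w in words[i + 1:] if w != '' and w != MARKER]
--
-- def get_textlist(list_of_file1, list_of_file2):
--     return _after_marker(list_of_file1), _after_marker(list_of_file2)
-- ===== Notes on version B (the rewrite author's own statement) =====
-- stated objective: simpler
-- what changed: Replaces the flag-driven single pass (boolean 'appeared' state threaded through the loop) by a find-split-then-filter decomposition: locate the first marker with list.index, slice the tail after it, and filter out '' and marker tokens.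
import Mathlib
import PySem

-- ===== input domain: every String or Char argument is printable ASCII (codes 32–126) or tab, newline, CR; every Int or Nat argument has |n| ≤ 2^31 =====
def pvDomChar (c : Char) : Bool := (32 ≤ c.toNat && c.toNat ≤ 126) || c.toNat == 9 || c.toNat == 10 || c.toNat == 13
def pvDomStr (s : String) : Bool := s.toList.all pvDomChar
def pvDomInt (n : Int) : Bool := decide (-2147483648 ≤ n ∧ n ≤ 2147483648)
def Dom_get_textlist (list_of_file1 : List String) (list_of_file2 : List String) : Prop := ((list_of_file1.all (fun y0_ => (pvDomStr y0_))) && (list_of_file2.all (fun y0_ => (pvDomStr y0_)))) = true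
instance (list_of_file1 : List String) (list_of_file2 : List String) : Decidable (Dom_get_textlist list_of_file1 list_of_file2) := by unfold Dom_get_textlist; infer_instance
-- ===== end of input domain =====

-- B replaces A's flag-driven pass by find-the-marker, slice the tail, filter; objective: simpler.

-- ===== PORT A =====
-- the for-loop of A, with its state (appeared, text_list accumulator); used for both lists
def pvLoopA : List String → Bool → List String → List String
  | [], _, acc => acc
  | w :: ws, appeared, acc =>
    if w = "</sprawozdanie>" then pvLoopA ws true acc
    else if appeared = true ∧ w ≠ "" then pvLoopA ws appeared (acc ++ [w])
    else pvLoopA ws appeared acc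

def get_textlist (list_of_file1 : List String) (list_of_file2 : List String) : List String × List String :=
  (pvLoopA list_of_file1 false [], pvLoopA list_of_file2 false [])

-- ===== PORT B =====
-- _after_marker from Source B: words.index(MARKER) → slice words[i+1:] → comprehension filter
def pvAfterMarker (words : List String) : List String :=
  match PySem.List.index? words "</sprawozdanie>" with
  | none => []
  | some i =>
      (PySem.List.slice words (some ((i : Int) + 1)) none).filter
        (fun w => w ≠ "" && w ≠ "</sprawozdanie>")

def get_textlist_alt (list_of_file1 : List String) (list_of_file2 : List String) : List String × List String :=
  (pvAfterMarker list_of_file1, pvAfterMarker list_of_file2)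

-- ===== PRECONDITION & SPEC =====
def Spec_get_textlist (list_of_file1 : List String) (list_of_file2 : List String) (out : List String × List String) : Prop := out = get_textlist_alt list_of_file1 list_of_file2
instance (list_of_file1 : List String) (list_of_file2 : List String) (out : List String × List String) : Decidable (Spec_get_textlist list_of_file1 list_of_file2 out) := by unfold Spec_get_textlist; infer_instance

-- ===== CLAIM (what is proved, stated in full; the proofs are below) =====
def Claim_equal_get_textlist : Prop := ∀ (list_of_file1 : List String) (list_of_file2 : List String), Dom_get_textlist list_of_file1 list_of_file2 → Spec_get_textlist list_of_file1 list_of_file2 (get_textlist list_of_file1 list_of_file2)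

-- ===== LEMMAS AND PROOFS =====
lemma pvLoopA_true (ws : List String) : ∀ acc,
    pvLoopA ws true acc = acc ++ ws.filter (fun w => w ≠ "</sprawozdanie>" && w ≠ "") := by
  induction ws with
  | nil => intro acc; simp [pvLoopA]
  | cons w ws ih =>
    intro acc
    by_cases hm : w = "</sprawozdanie>"
    · simp [pvLoopA, hm, ih]
    · by_cases he : w = ""
      · simp [pvLoopA, he, ih]
      · simp [pvLoopA, hm, he, ih]

lemma pvLoopA_false (ws : List String) : ∀ acc,
    pvLoopA ws false acc = acc ++ pvAfterMarker ws := by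
  induction ws with
  | nil => intro acc; simp [pvLoopA, pvAfterMarker, PySem.List.index?]
  | cons w ws ih =>
    intro acc
    by_cases hm : w = "</sprawozdanie>"
    · rw [hm]
      show pvLoopA _ _ _ = _
      rw [pvLoopA]
      rw [if_pos rfl, pvLoopA_true]
      unfold pvAfterMarker
      rw [PySem.List.index?_cons_self]
      dsimp only
      rw [show ((0 : Nat) : Int) + 1 = ((1 : Nat) : Int) by norm_num,
          PySem.List.slice_from_natCast]
      simp only [List.drop_one, List.tail_cons]
      congr 1
      apply List.filter_congr
      intro x _
      by_cases h1 : x = "</sprawozdanie>" <;> by_cases h2 : x = "" <;> simp [h1, h2]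
    · have step : pvLoopA (w :: ws) false acc = pvLoopA ws false acc := by
        rw [pvLoopA]; simp [hm]
      rw [step, ih]
      congr 1
      unfold pvAfterMarker
      rw [PySem.List.index?_cons_of_ne _ hm]
      cases h : PySem.List.index? ws "</sprawozdanie>" with
      | none => simp
      | some i =>
        simp only [Option.map_some]
        rw [show ((i : Int) + 1) = (((i + 1 : Nat)) : Int) by push_cast; ring,
            show (((i + 1 : Nat) : Int) + 1) = (((i + 2 : Nat)) : Int) by push_cast; ring,
            PySem.List.slice_from_natCast, PySem.List.slice_from_natCast]
        rw [show i + 2 = (i + 1) + 1 from rfl, List.drop_succ_cons]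

-- ===== VERDICT (by name: the statement is the Claim_ definition above) =====
theorem get_textlist_spec : Claim_equal_get_textlist := by
  intro l1 l2 _
  unfold Spec_get_textlist get_textlist get_textlist_alt
  rw [pvLoopA_false, pvLoopA_false]
  simp
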